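-- pv_equiv track=rewrite | github.com/Imsharad/financial-agent-system | project/starter_code/helper_modules/agent_coordinator.py | _detect_pii_fields
-- ===== SOURCE A (Python) =====
-- def _detect_pii_fields(field_names: list) -> set:
--     """Detect which fields contain PII based on field names
--
--     This method identifies potentially sensitive database fields that need protection.
--
--     Args:
--         field_names: List of database column names
--
--     Returns:
--         Set of field names that contain PII
--     """
--     # Define PII field patterns (email, phone, names, address, ssn, etc.)
--     pii_patterns = {
--         # Email patterns
--         'email', 'email_address', 'e_mail', 'e-mail', 'email_addr',
--         # Phone patterns
--         'phone', 'phone_number', 'telephone', 'mobile', 'cell', 'contact_number',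
--         # Name patterns
--         'first_name', 'last_name', 'full_name', 'customer_name', 'name', 'given_name', 'surname',
--         # Address patterns
--         'address', 'street_address', 'mailing_address', 'home_address', 'physical_address',
--         # SSN patterns
--         'ssn', 'social_security_number', 'tax_id', 'tax_id_number', 'ssn_number'
--     }
--
--     detected_pii = set()
--
--     # Check each field name against patterns (case-insensitive)
--     for field_name in field_names:
--         field_lower = str(field_name).lower().strip()
--
--         # Direct match
--         if field_lower in pii_patterns:
--             detected_pii.add(field_name)
--             continue
--
--         # Pattern matching - check if any PII pattern is in the field name
--         for pattern in pii_patterns: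
--             if pattern in field_lower:
--                 detected_pii.add(field_name)
--                 break
--
--     return detected_pii
-- ===== SOURCE B (Python) =====
-- # Character-dispatch scan: the pattern set is pre-indexed by first character; each
-- # normalized field is scanned once, suffix by suffix, trying only the remainders
-- # of patterns that start with the current character (A's exact-match branch is
-- # subsumed: an exact match is a match at position 0).
-- _PII_BY_FIRST = {
--     'a': ('ddress',),
--     'c': ('ell', 'ontact_number', 'ustomer_name'),
--     'e': ('mail', 'mail_address', '_mail', '-mail', 'mail_addr'),
--     'f': ('irst_name', 'ull_name'),
--     'g': ('iven_name',),
--     'h': ('ome_address',),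
--     'l': ('ast_name',),
--     'm': ('obile', 'ailing_address'),
--     'n': ('ame',),
--     'p': ('hone', 'hone_number', 'hysical_address'),
--     's': ('urname', 'treet_address', 'sn', 'ocial_security_number', 'sn_number'),
--     't': ('elephone', 'ax_id', 'ax_id_number'),
-- }
--
--
-- def _match_pii(s: str) -> bool:
--     """Does any PII pattern occur in s?  Walk the suffixes of s; at each position
--     dispatch on the current character and try only that character's remainders."""
--     while s:
--         ch, s = s[0], s[1:]
--         for rem in _PII_BY_FIRST.get(ch, ()):
--             if s.startswith(rem):
--                 return True
--     return False
--
--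
-- def _detect_pii_fields(field_names: list) -> set:
--     return {f for f in field_names if _match_pii(str(f).lower().strip())}
-- ===== Notes on version B (the rewrite author's own statement) =====
-- stated objective: alternative
-- what changed: B replaces A's per-field exact-match branch plus inner loop over all 28 patterns (each doing its own substring search) by a precomputed first-character dispatch table: each normalized field is scanned once, suffix by suffix, and at each position only the remainders of the patterns starting with the current character are tried as prefixes; an exact match is subsumed by a match at position 0.
import Mathlib
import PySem

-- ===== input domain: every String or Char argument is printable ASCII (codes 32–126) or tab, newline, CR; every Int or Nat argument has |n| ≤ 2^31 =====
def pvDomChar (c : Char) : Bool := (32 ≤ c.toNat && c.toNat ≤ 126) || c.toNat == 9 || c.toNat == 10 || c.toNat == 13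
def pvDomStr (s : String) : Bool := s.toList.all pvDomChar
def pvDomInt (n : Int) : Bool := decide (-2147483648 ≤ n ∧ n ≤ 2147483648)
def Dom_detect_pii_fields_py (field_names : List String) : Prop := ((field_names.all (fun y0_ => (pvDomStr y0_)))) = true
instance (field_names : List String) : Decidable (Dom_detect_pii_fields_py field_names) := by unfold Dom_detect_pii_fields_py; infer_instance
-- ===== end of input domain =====

-- B replaces A's per-field loops over the 28-pattern set (exact-match branch plus
-- per-pattern substring scan) by a first-character dispatch table: each normalized
-- field is scanned once, suffix by suffix, trying only the remainders of patterns
-- that begin with the current character (alternative decomposition; exact match is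
-- subsumed by a match at position 0).

-- ===== PORT A =====
def pyPiiPatterns : PySem.Set String :=
  PySem.Set.ofList
    ["email", "email_address", "e_mail", "e-mail", "email_addr",
     "phone", "phone_number", "telephone", "mobile", "cell", "contact_number",
     "first_name", "last_name", "full_name", "customer_name", "name", "given_name", "surname",
     "address", "street_address", "mailing_address", "home_address", "physical_address",
     "ssn", "social_security_number", "tax_id", "tax_id_number", "ssn_number"]

def detect_pii_fields_py (field_names : List String) : List String :=
  field_names.foldl
    (fun detected field_name =>
      let field_lower := PySem.Str.strip (PySem.Str.lower field_name)
      if PySem.Set.contains pyPiiPatterns field_lower then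
        PySem.Set.add detected field_name
      else if pyPiiPatterns.any (fun pattern => PySem.Str.isIn pattern field_lower) then
        -- inner for-loop with 'break' after the first matching pattern = any
        PySem.Set.add detected field_name
      else detected)
    PySem.Set.empty

-- ===== PORT B =====
def pyPiiByFirst : PySem.Dict Char (List String) :=
  PySem.Dict.ofList [
    ('a', ["ddress"]),
    ('c', ["ell", "ontact_number", "ustomer_name"]),
    ('e', ["mail", "mail_address", "_mail", "-mail", "mail_addr"]),
    ('f', ["irst_name", "ull_name"]),
    ('g', ["iven_name"]),
    ('h', ["ome_address"]),
    ('l', ["ast_name"]),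
    ('m', ["obile", "ailing_address"]),
    ('n', ["ame"]),
    ('p', ["hone", "hone_number", "hysical_address"]),
    ('s', ["urname", "treet_address", "sn", "ocial_security_number", "sn_number"]),
    ('t', ["elephone", "ax_id", "ax_id_number"])]

-- the while loop 'ch, s = s[0], s[1:]' with early return = structural recursion on the chars
def pyMatchPii : List Char → Bool
  | [] => false
  | c :: rest =>
    ((PySem.Dict.getD pyPiiByFirst c []).any
        (fun rem => PySem.Chars.startswith rest rem.toList)) || pyMatchPii rest

def detect_pii_fields_py_alt (field_names : List String) : List String :=
  PySem.Set.ofList (field_names.filter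
    (fun f => pyMatchPii (PySem.Str.strip (PySem.Str.lower f)).toList))

-- ===== PRECONDITION & SPEC =====
def Spec_detect_pii_fields_py (field_names : List String) (out : List String) : Prop := out = detect_pii_fields_py_alt field_names
instance (field_names : List String) (out : List String) : Decidable (Spec_detect_pii_fields_py field_names out) := by unfold Spec_detect_pii_fields_py; infer_instance

-- ===== CLAIM (what is proved, stated in full; the proofs are below) =====
def Claim_equal_detect_pii_fields_py : Prop := ∀ (field_names : List String), Dom_detect_pii_fields_py field_names → Spec_detect_pii_fields_py field_names (detect_pii_fields_py field_names)

-- ===== LEMMAS AND PROOFS =====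

-- A's pattern set, as the plain list of its 28 (distinct) elements
def piiList : List String :=
  ["email", "email_address", "e_mail", "e-mail", "email_addr",
   "phone", "phone_number", "telephone", "mobile", "cell", "contact_number",
   "first_name", "last_name", "full_name", "customer_name", "name", "given_name", "surname",
   "address", "street_address", "mailing_address", "home_address", "physical_address",
   "ssn", "social_security_number", "tax_id", "tax_id_number", "ssn_number"]

lemma pyPiiPatterns_eq : pyPiiPatterns = piiList := by decide

-- one step of B's scan = "some whole pattern is a prefix here":
-- the dispatch table holds, under each character, exactly the tails of the patterns
-- that start with it
lemma hit_cons (c : Char) (rest : List Char) :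
    ((PySem.Dict.getD pyPiiByFirst c []).any
        (fun rem => PySem.Chars.startswith rest rem.toList))
    = piiList.any (fun p => decide (p.toList <+: c :: rest)) := by
  have hsw : ∀ (r : List Char), PySem.Chars.startswith rest r = decide (r <+: rest) := fun r =>
    Bool.coe_iff_coe.mp ((PySem.Chars.startswith_iff rest r).trans (decide_eq_true_iff).symm)
  have hmk : pyPiiByFirst = PySem.Dict.mk [
    ('a', ["ddress"]), ('c', ["ell", "ontact_number", "ustomer_name"]),
    ('e', ["mail", "mail_address", "_mail", "-mail", "mail_addr"]), ('f', ["irst_name", "ull_name"]),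
    ('g', ["iven_name"]), ('h', ["ome_address"]), ('l', ["ast_name"]),
    ('m', ["obile", "ailing_address"]), ('n', ["ame"]),
    ('p', ["hone", "hone_number", "hysical_address"]),
    ('s', ["urname", "treet_address", "sn", "ocial_security_number", "sn_number"]),
    ('t', ["elephone", "ax_id", "ax_id_number"])] := by decide
  by_cases hA : 'a' = c; · subst hA; simp [hmk, piiList, PySem.Dict.getD, PySem.Dict.get?_mk_cons, hsw, List.cons_prefix_cons]; try rfl
  by_cases hC : 'c' = c; · subst hC; simp [hmk, piiList, PySem.Dict.getD, PySem.Dict.get?_mk_cons, hsw, List.cons_prefix_cons]; try rfl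
  by_cases hE : 'e' = c; · subst hE; simp [hmk, piiList, PySem.Dict.getD, PySem.Dict.get?_mk_cons, hsw, List.cons_prefix_cons]; try rfl
  by_cases hF : 'f' = c; · subst hF; simp [hmk, piiList, PySem.Dict.getD, PySem.Dict.get?_mk_cons, hsw, List.cons_prefix_cons]; try rfl
  by_cases hG : 'g' = c; · subst hG; simp [hmk, piiList, PySem.Dict.getD, PySem.Dict.get?_mk_cons, hsw, List.cons_prefix_cons]; try rfl
  by_cases hH : 'h' = c; · subst hH; simp [hmk, piiList, PySem.Dict.getD, PySem.Dict.get?_mk_cons, hsw, List.cons_prefix_cons]; try rfl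
  by_cases hL : 'l' = c; · subst hL; simp [hmk, piiList, PySem.Dict.getD, PySem.Dict.get?_mk_cons, hsw, List.cons_prefix_cons]; try rfl
  by_cases hM : 'm' = c; · subst hM; simp [hmk, piiList, PySem.Dict.getD, PySem.Dict.get?_mk_cons, hsw, List.cons_prefix_cons]; try rfl
  by_cases hN : 'n' = c; · subst hN; simp [hmk, piiList, PySem.Dict.getD, PySem.Dict.get?_mk_cons, hsw, List.cons_prefix_cons]; try rfl
  by_cases hP : 'p' = c; · subst hP; simp [hmk, piiList, PySem.Dict.getD, PySem.Dict.get?_mk_cons, hsw, List.cons_prefix_cons]; try rfl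
  by_cases hS : 's' = c; · subst hS; simp [hmk, piiList, PySem.Dict.getD, PySem.Dict.get?_mk_cons, hsw, List.cons_prefix_cons]; try rfl
  by_cases hT : 't' = c; · subst hT; simp [hmk, piiList, PySem.Dict.getD, PySem.Dict.get?_mk_cons, hsw, List.cons_prefix_cons]; try rfl
  simp [hmk, piiList, PySem.Dict.getD, List.cons_prefix_cons,
    hA, hC, hE, hF, hG, hH, hL, hM, hN, hP, hS, hT, PySem.Dict.get?]

-- any distributes over || (pointwise)
lemma any_or_split {α : Type} (xs : List α) (f g : α → Bool) :
    xs.any (fun x => f x || g x) = (xs.any f || xs.any g) := by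
  induction xs with
  | nil => rfl
  | cons a l ih => cases hf : f a <;> cases hg : g a <;> simp [List.any_cons, hf, hg, ih]

-- B's whole scan = "some pattern is an infix"
lemma pyMatchPii_eq (l : List Char) :
    pyMatchPii l = piiList.any (fun p => decide (p.toList <:+: l)) := by
  induction l with
  | nil => decide
  | cons c rest ih =>
    have hsplit : ∀ p : String, decide (p.toList <:+: c :: rest)
        = (decide (p.toList <+: c :: rest) || decide (p.toList <:+: rest)) := by
      intro p
      rcases h : decide (p.toList <:+: c :: rest) with _ | _
      · rw [decide_eq_false_iff_not, List.infix_cons_iff, not_or] at h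
        simp [decide_eq_false h.1, decide_eq_false h.2]
      · rw [decide_eq_true_iff, List.infix_cons_iff] at h
        rcases h with h | h
        · simp [decide_eq_true h]
        · simp [decide_eq_true h]
    calc pyMatchPii (c :: rest)
        = (piiList.any (fun p => decide (p.toList <+: c :: rest))
            || piiList.any (fun p => decide (p.toList <:+: rest))) := by
          rw [pyMatchPii, hit_cons, ih]
      _ = piiList.any (fun p => decide (p.toList <:+: c :: rest)) := by
          rw [← any_or_split]
          congr 1
          funext p
          exact (hsplit p).symm

-- A's per-field test (exact membership, else any-pattern substring) = plain
-- any-pattern substring over the 28 patterns (exact match ⇒ the pattern 'fl'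
-- itself is a substring of fl)
lemma a_test_eq (fl : String) :
    (PySem.Set.contains pyPiiPatterns fl
      || pyPiiPatterns.any (fun p => PySem.Str.isIn p fl))
    = piiList.any (fun p => PySem.Str.isIn p fl) := by
  rw [pyPiiPatterns_eq]
  rcases hc : PySem.Set.contains (α := String) piiList fl with _ | _
  · simp
  · have hmem : fl ∈ piiList := by
      simpa [PySem.Set.contains] using hc
    have hself : PySem.Str.isIn fl fl = true :=
      (PySem.Str.isIn_iff_infix fl fl).mpr (List.infix_refl _)
    simp only [Bool.true_or]
    rw [eq_comm, List.any_eq_true]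
    exact ⟨fl, hmem, by simpa using hself⟩

-- B's per-field test = A's any-pattern substring test
lemma b_test_eq (fl : String) :
    pyMatchPii fl.toList = piiList.any (fun p => PySem.Str.isIn p fl) := by
  rw [pyMatchPii_eq]
  congr 1
  funext p
  exact Bool.coe_iff_coe.mp
    ((decide_eq_true_iff).trans (PySem.Str.isIn_iff_infix p fl).symm)

-- a fold that conditionally adds = filter then fold of adds (specific loop shape of A)
lemma foldl_add_if (p : String → Bool) (xs : List String) (s : PySem.Set String) :
    xs.foldl (fun d f => if p f then PySem.Set.add d f else d) s
      = (xs.filter p).foldl PySem.Set.add s := by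
  induction xs generalizing s with
  | nil => rfl
  | cons x xs ih =>
    by_cases hx : p x = true
    · simp [hx, ih]
    · simp [List.foldl, hx, ih]

-- ===== VERDICT (by name: the statement is the Claim_ definition above) =====
theorem detect_pii_fields_py_spec : Claim_equal_detect_pii_fields_py := by
  intro field_names _
  unfold Spec_detect_pii_fields_py detect_pii_fields_py detect_pii_fields_py_alt
  rw [PySem.Set.ofList_eq_foldl, ← foldl_add_if]
  apply List.foldl_ext
  intro d f _
  simp only
  rw [b_test_eq, ← a_test_eq (PySem.Str.strip (PySem.Str.lower f))]
  rcases hc : PySem.Set.contains pyPiiPatterns (PySem.Str.strip (PySem.Str.lower f)) with _ | _ <;>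
    rcases ha : pyPiiPatterns.any (fun p => PySem.Str.isIn p (PySem.Str.strip (PySem.Str.lower f))) with _ | _ <;>
    simp_all
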